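-- pv_equiv track=rewrite | github.com/Valparaiso-Data-Science/general-course-relevance-discovery | source/punct_split.py | space_parantheses
-- ===== SOURCE A (Python) =====
-- def space_parantheses(input_string):
--     """
--     add spaces before and after parentheses (or square, curly, or angle brackets)
--     """
--
--     char_list = []
--
--     for i in range(len(input_string)):
--         if (input_string[i] == "(") and (i != 0) and (input_string[i - 1] != " "):
--             char_list.append(" ")
--             char_list.append("(")
--
--         elif (input_string[i] == "[") and (i != 0) and (input_string[i - 1] != " "):
--             char_list.append(" ")
--             char_list.append("[")
--
--         elif (input_string[i] == "{") and (i != 0) and (input_string[i - 1] != " "):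
--             char_list.append(" ")
--             char_list.append("{")
--
--         elif (input_string[i] == "<") and (i != 0) and (input_string[i - 1] != " "):
--             char_list.append(" ")
--             char_list.append("<")
--
--         else:
--             char_list.append(input_string[i])
--
--     return "".join(char_list)
-- ===== SOURCE B (Python) =====
-- def space_parantheses(input_string):
--     """
--     add spaces before and after parentheses (or square, curly, or angle brackets)
--     """
--     # Stage 1: tokenize into maximal bracket-free text chunks and the brackets between them.
--     texts, brackets, seg = [], [], []
--     for ch in input_string:
--         if ch in "([{<":
--             texts.append("".join(seg))
--             brackets.append(ch)
--             seg = []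
--         else:
--             seg.append(ch)
--     texts.append("".join(seg))
--     # Stage 2: rejoin; decide each boundary from the chunk before the bracket.
--     out = [texts[0]]
--     prev, first = texts[0], True
--     for b, nxt in zip(brackets, texts[1:]):
--         if (prev and prev[-1] != " ") or (not prev and not first):
--             out.append(" ")
--         out.append(b)
--         out.append(nxt)
--         prev, first = nxt, False
--     return "".join(out)
-- ===== Notes on version B (the rewrite author's own statement) =====
-- stated objective: alternative
-- what changed: Replaces A's single index loop with four per-bracket branches and s[i-1] lookbacks by a two-stage split/join: first tokenize the string into maximal bracket-free chunks plus the bracket list, then rejoin them, deciding each boundary space from the chunk preceding the bracket; handling text in whole chunks avoids per-character index arithmetic.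
import Mathlib
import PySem

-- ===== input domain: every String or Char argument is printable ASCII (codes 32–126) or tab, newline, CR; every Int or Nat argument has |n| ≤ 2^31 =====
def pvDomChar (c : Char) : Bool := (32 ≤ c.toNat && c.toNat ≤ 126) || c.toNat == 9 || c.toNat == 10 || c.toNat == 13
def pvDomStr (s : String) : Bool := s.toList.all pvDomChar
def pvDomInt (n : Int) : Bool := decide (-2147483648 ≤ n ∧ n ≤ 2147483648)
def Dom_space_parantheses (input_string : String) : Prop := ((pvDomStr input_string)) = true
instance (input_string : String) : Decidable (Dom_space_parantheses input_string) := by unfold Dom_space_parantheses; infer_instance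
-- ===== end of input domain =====

-- B replaces A's per-index scan with s[i-1] lookbacks by a two-stage split/join:
-- tokenize into bracket-free chunks + brackets, then rejoin deciding each boundary
-- from the preceding chunk. Alternative decomposition, same O(n) cost.

-- ===== PORT A =====
-- A: loop i over range(len(s)); four elif branches, each testing one bracket,
-- i != 0 and s[i-1] != ' '; appends to char_list; ''.join at the end.
def spStepA (cs : List Char) (acc : List Char) (i : Int) : List Char :=
  if (PySem.List.pyGetD cs i ' ' == '(') && (i != 0) && (PySem.List.pyGetD cs (i-1) ' ' != ' ') then
    (acc ++ [' ']) ++ ['(']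
  else if (PySem.List.pyGetD cs i ' ' == '[') && (i != 0) && (PySem.List.pyGetD cs (i-1) ' ' != ' ') then
    (acc ++ [' ']) ++ ['[']
  else if (PySem.List.pyGetD cs i ' ' == '{') && (i != 0) && (PySem.List.pyGetD cs (i-1) ' ' != ' ') then
    (acc ++ [' ']) ++ ['{']
  else if (PySem.List.pyGetD cs i ' ' == '<') && (i != 0) && (PySem.List.pyGetD cs (i-1) ' ' != ' ') then
    (acc ++ [' ']) ++ ['<']
  else
    acc ++ [PySem.List.pyGetD cs i ' ']
-- pyGetD is exact here: every index used (i and i-1 with i ≥ 1) is in range.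

def space_parantheses (input_string : String) : String :=
  String.ofList ((PySem.List.pyRange 0 (input_string.toList.length : Int) 1).foldl
    (spStepA input_string.toList) [])

-- ===== PORT B =====
-- ch in "([{<"
def pvIsBr (c : Char) : Bool := "([{<".toList.contains c

-- stage 1 loop body: state = (texts, brackets, seg)
def tokStep (st : List (List Char) × List Char × List Char) (ch : Char) :
    List (List Char) × List Char × List Char :=
  if pvIsBr ch then (st.1 ++ [st.2.2], st.2.1 ++ [ch], ([] : List Char))
  else (st.1, st.2.1, st.2.2 ++ [ch])

-- stage 2 loop body: state = (out, prev, first), input = (b, nxt)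
def joinStep (st : List Char × List Char × Bool) (p : Char × List Char) :
    List Char × List Char × Bool :=
  let out := if (!st.2.1.isEmpty && (st.2.1.getLastD ' ' != ' ')) || (st.2.1.isEmpty && !st.2.2)
             then st.1 ++ [' '] else st.1
  (out ++ [p.1] ++ p.2, p.2, false)
-- getLastD is exact: it is guarded by !isEmpty, matching Python's prev[-1] under `prev and`.

def space_parantheses_alt (input_string : String) : String :=
  let st := input_string.toList.foldl tokStep ([], [], [])
  let texts := st.1 ++ [st.2.2]
  let res := (List.zip st.2.1 texts.tail).foldl joinStep (texts.headD [], texts.headD [], true)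
  String.ofList res.1

-- ===== PRECONDITION & SPEC =====
def Spec_space_parantheses (input_string : String) (out : String) : Prop := out = space_parantheses_alt input_string
instance (input_string : String) (out : String) : Decidable (Spec_space_parantheses input_string out) := by unfold Spec_space_parantheses; infer_instance

-- ===== CLAIM (what is proved, stated in full; the proofs are below) =====
def Claim_equal_space_parantheses : Prop := ∀ (input_string : String), Dom_space_parantheses input_string → Spec_space_parantheses input_string (space_parantheses input_string)

-- ===== LEMMAS AND PROOFS =====

-- canonical description: process cs knowing whether the previous char exists and is not a space
def canonB (pns : Bool) : List Char → List Char
  | [] => []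
  | c :: rest => (if pvIsBr c && pns then [' ', c] else [c]) ++ canonB (c != ' ') rest

lemma pvIsBr_eq (c : Char) :
    pvIsBr c = (c == '(' || c == '[' || c == '{' || c == '<') := by
  rw [Bool.eq_iff_iff]; simp [pvIsBr]; tauto

-- ---- A-side ----

lemma spStepA_eq (cs : List Char) (acc : List Char) (k : Nat) (hk : 1 ≤ k)
    (hlt : k < cs.length) :
    spStepA cs acc (k : Int) =
      acc ++ (if pvIsBr cs[k] && (cs[k-1]! != ' ') then [' ', cs[k]] else [cs[k]]) := by
  have h1 : PySem.List.pyGetD cs (k : Int) ' ' = cs[k] := by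
    rw [PySem.List.pyGetD_natCast]
    simp [List.getD_eq_getElem?_getD, List.getElem?_eq_getElem hlt]
  have h2 : ((k : Int) - 1) = ((k - 1 : Nat) : Int) := by omega
  have h3 : PySem.List.pyGetD cs ((k : Int) - 1) ' ' = cs[k-1]! := by
    rw [h2, PySem.List.pyGetD_natCast]
    have : k - 1 < cs.length := by omega
    simp [List.getD_eq_getElem?_getD, getElem!_pos, this]
  have h0 : ((k : Int) != 0) = true := by simp; omega
  simp only [spStepA, h1, h3, h0, Bool.and_true, pvIsBr_eq]
  by_cases hsp : cs[k-1]! != ' '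
  · simp only [hsp, Bool.and_true]
    by_cases e1 : cs[k] = '(' <;> by_cases e2 : cs[k] = '[' <;>
      by_cases e3 : cs[k] = '{' <;> by_cases e4 : cs[k] = '<' <;>
      simp_all
  · simp at hsp
    simp [hsp]

lemma spA_fold (cs : List Char) : ∀ (m k : Nat) (acc : List Char),
    1 ≤ k → k + m = cs.length →
    (List.range' k m).foldl (fun a (i : Nat) => spStepA cs a (i : Int)) acc =
      acc ++ canonB (cs[k-1]! != ' ') (cs.drop k) := by
  intro m
  induction m with
  | zero =>
      intro k acc hk he
      have : cs.drop k = [] := by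
        apply List.drop_eq_nil_of_le; omega
      simp [this, canonB]
  | succ m ih =>
      intro k acc hk he
      have hlt : k < cs.length := by omega
      rw [List.range'_succ, List.foldl_cons]
      show List.foldl _ (spStepA cs acc (k : Int)) _ = _
      rw [spStepA_eq cs acc k hk hlt, ih (k+1) _ (by omega) (by omega)]
      have hd : cs.drop k = cs[k] :: cs.drop (k+1) := List.drop_eq_getElem_cons hlt
      have hg : cs[(k+1)-1]! = cs[k] := by
        simp [getElem!_pos, hlt]
      rw [hg, hd, canonB, List.append_assoc]

lemma spA_main (cs : List Char) :
    (PySem.List.pyRange 0 (cs.length : Int) 1).foldl (spStepA cs) [] = canonB false cs := by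
  match cs with
  | [] => simp [PySem.List.pyRange, canonB]
  | c :: rest =>
      rw [PySem.List.pyRange_zero_natCast, List.foldl_map, List.range_eq_range']
      simp only [List.length_cons]
      rw [List.range'_succ, List.foldl_cons]
      show List.foldl _ (spStepA (c :: rest) [] ((0 : Nat) : Int)) _ = _
      have h0 : spStepA (c :: rest) [] ((0 : Nat) : Int) = [c] := by
        simp [spStepA]
      rw [h0]
      have := spA_fold (c :: rest) rest.length 1 [c] (by omega) (by simp [Nat.add_comm])
      rw [this]
      show [c] ++ canonB ((c :: rest)[0]! != ' ') rest = canonB false (c :: rest)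
      have : (c :: rest)[0]! = c := by simp
      rw [this, canonB]
      simp

-- ---- B-side ----

-- recursive description of stage 1 (texts-so-far, brackets, final open segment)
def tkB : List Char → List Char → List (List Char) × List Char × List Char
  | seg, [] => ([], [], seg)
  | seg, c :: rest =>
      if pvIsBr c then
        ((seg :: (tkB [] rest).1, c :: (tkB [] rest).2.1, (tkB [] rest).2.2))
      else tkB (seg ++ [c]) rest

-- the python boundary condition, as a function of (prev chunk, first flag)
def spB (seg : List Char) (f : Bool) : Bool :=
  (!seg.isEmpty && (seg.getLastD ' ' != ' ')) || (seg.isEmpty && !f)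

-- what stage 2 appends after the initial chunk
def DfunB : List Char → Bool → List Char → List Char
  | _, _, [] => []
  | seg, f, c :: rest =>
      if pvIsBr c then
        (if spB seg f then [' '] else []) ++ [c] ++
          ((tkB [] rest).1 ++ [(tkB [] rest).2.2]).headD [] ++ DfunB [] false rest
      else DfunB (seg ++ [c]) f rest

lemma tok_tk (cs : List Char) : ∀ (ts : List (List Char)) (bs seg : List Char),
    cs.foldl tokStep (ts, bs, seg) =
      (ts ++ (tkB seg cs).1, bs ++ (tkB seg cs).2.1, (tkB seg cs).2.2) := by
  induction cs with
  | nil => intro ts bs seg; simp [tkB]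
  | cons c rest ih =>
      intro ts bs seg
      rw [List.foldl_cons]
      by_cases hbr : pvIsBr c
      · show List.foldl tokStep (tokStep (ts, bs, seg) c) rest = _
        simp only [tokStep, hbr, if_pos]
        rw [ih]
        simp [tkB, hbr]
      · show List.foldl tokStep (tokStep (ts, bs, seg) c) rest = _
        simp only [tokStep, hbr, if_neg, Bool.false_eq_true, not_false_iff]
        rw [ih]
        simp [tkB, hbr]

lemma joinStep_eq (out seg : List Char) (f : Bool) (c : Char) (t : List Char) :
    joinStep (out, seg, f) (c, t) =
      (out ++ (if spB seg f then [' '] else []) ++ [c] ++ t, t, false) := by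
  unfold joinStep spB
  cases hb : (!seg.isEmpty && (seg.getLastD ' ' != ' ')) || (seg.isEmpty && !f) <;> simp_all

lemma texts_cons (l : List (List Char)) (x : List Char) :
    l ++ [x] = (l ++ [x]).headD [] :: (l ++ [x]).tail := by
  cases l <;> simp

lemma spJ_fold (cs : List Char) : ∀ (seg out : List Char) (f : Bool),
    ((List.zip (tkB seg cs).2.1 ((tkB seg cs).1 ++ [(tkB seg cs).2.2]).tail).foldl
        joinStep (out, ((tkB seg cs).1 ++ [(tkB seg cs).2.2]).headD [], f)).1
      = out ++ DfunB seg f cs := by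
  induction cs with
  | nil => intro seg out f; simp [tkB, DfunB]
  | cons c rest ih =>
      intro seg out f
      by_cases hbr : pvIsBr c
      · simp only [tkB, hbr, if_pos, DfunB]
        -- texts = seg :: Texts [] rest
        set T := (tkB [] rest).1 ++ [(tkB [] rest).2.2] with hT
        have hTc : T = T.headD [] :: T.tail := texts_cons _ _
        show ((List.zip (c :: (tkB [] rest).2.1) ((seg :: T).tail)).foldl joinStep
            (out, (seg :: T).headD [], f)).1 = _
        rw [List.tail_cons, List.headD_cons]
        rw [hTc, List.zip_cons_cons, List.foldl_cons, ← hTc]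
        rw [joinStep_eq]
        have := ih [] (out ++ (if spB seg f then [' '] else []) ++ [c] ++ T.headD []) false
        rw [← hT] at this
        rw [this]
        simp
      · simp only [tkB, hbr, if_neg, Bool.false_eq_true, not_false_iff, DfunB]
        exact ih (seg ++ [c]) out f

lemma pvIsBr_ne_space {c : Char} (h : pvIsBr c = true) : (c != ' ') = true := by
  rw [pvIsBr_eq] at h
  rcases Bool.or_eq_true_iff.mp h with h | h
  · rcases Bool.or_eq_true_iff.mp h with h | h
    · rcases Bool.or_eq_true_iff.mp h with h | h <;> simp_all
    · simp_all
  · simp_all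

lemma spC (cs : List Char) : ∀ (seg : List Char) (f : Bool),
    ((tkB seg cs).1 ++ [(tkB seg cs).2.2]).headD [] ++ DfunB seg f cs
      = seg ++ canonB (spB seg f) cs := by
  induction cs with
  | nil => intro seg f; simp [tkB, DfunB, canonB]
  | cons c rest ih =>
      intro seg f
      by_cases hbr : pvIsBr c
      · simp only [tkB, hbr, if_pos, DfunB, List.cons_append, List.headD_cons]
        have h1 : spB [] false = true := by simp [spB]
        have h2 := ih [] false
        rw [h1] at h2
        rw [canonB]
        have h3 : (c != ' ') = true := pvIsBr_ne_space hbr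
        rw [h3, hbr]
        simp only [Bool.true_and, List.nil_append] at h2 ⊢
        rw [← List.append_assoc, ← List.append_assoc, List.append_assoc _ _ (DfunB [] false rest), h2]
        by_cases hsp : spB seg f <;> simp [hsp]
      · simp only [tkB, hbr, if_neg, Bool.false_eq_true, not_false_iff, DfunB]
        rw [ih (seg ++ [c]) f, canonB]
        have he : (seg ++ [c]).isEmpty = false := by cases seg <;> simp
        have h1 : spB (seg ++ [c]) f = (c != ' ') := by simp [spB, he]
        have hbf : pvIsBr c = false := by simpa using hbr
        rw [h1, hbf]
        simp

lemma spB_main (cs : List Char) :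
    ((List.zip (cs.foldl tokStep ([], [], [])).2.1
      ((cs.foldl tokStep ([], [], [])).1 ++ [(cs.foldl tokStep ([], [], [])).2.2]).tail).foldl
      joinStep
      (((cs.foldl tokStep ([], [], [])).1 ++ [(cs.foldl tokStep ([], [], [])).2.2]).headD [],
       ((cs.foldl tokStep ([], [], [])).1 ++ [(cs.foldl tokStep ([], [], [])).2.2]).headD [], true)).1
      = canonB false cs := by
  rw [tok_tk cs [] [] []]
  simp only [List.nil_append]
  rw [spJ_fold cs [] _ true]
  have := spC cs [] true
  have h0 : spB [] true = false := by simp [spB]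
  rw [h0] at this
  simpa using this

-- ===== VERDICT (by name: the statement is the Claim_ definition above) =====
theorem space_parantheses_spec : Claim_equal_space_parantheses := by
  intro s _
  unfold Spec_space_parantheses space_parantheses space_parantheses_alt
  rw [spA_main]
  exact congrArg String.ofList (spB_main s.toList).symm
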